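-- pv_equiv track=rewrite | github.com/Xuanma0/Project-Be-your-eyes | Gateway/scripts/run_ablation_pov_budget.py | _parse_budgets
-- ===== SOURCE A (Python) =====
-- def _parse_budgets(raw: str) -> list[int]:
--     budgets: list[int] = []
--     seen: set[int] = set()
--     for chunk in str(raw or "").split(","):
--         text = chunk.strip()
--         if not text:
--             continue
--         value = int(text)
--         if value <= 0:
--             continue
--         if value in seen:
--             continue
--         seen.add(value)
--         budgets.append(value)
--     if not budgets:
--         raise ValueError("budgets must contain at least one positive integer")
--     return budgets
-- ===== SOURCE B (Python) =====
-- def _parse_budgets(raw: str) -> list[int]: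
--     # Reverse traversal: walking the tokens back-to-front and removing the new
--     # value's duplicates from the accumulated list keeps exactly the first
--     # occurrence (in original order) of every positive value — no seen-set needed.
--     budgets: list[int] = []
--     for chunk in reversed(str(raw or "").split(",")):
--         text = chunk.strip()
--         if not text:
--             continue
--         value = int(text)
--         if value <= 0:
--             continue
--         budgets = [value] + [v for v in budgets if v != value]
--     if not budgets:
--         raise ValueError("budgets must contain at least one positive integer")
--     return budgets
-- ===== Notes on version B (the rewrite author's own statement) =====
-- stated objective: alternative
-- what changed: Replaces A's forward pass with a maintained seen-set by a reverse traversal that, at each positive value, prepends it and filters its duplicates out of the accumulated result, so no auxiliary seen structure exists.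
import Mathlib
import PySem

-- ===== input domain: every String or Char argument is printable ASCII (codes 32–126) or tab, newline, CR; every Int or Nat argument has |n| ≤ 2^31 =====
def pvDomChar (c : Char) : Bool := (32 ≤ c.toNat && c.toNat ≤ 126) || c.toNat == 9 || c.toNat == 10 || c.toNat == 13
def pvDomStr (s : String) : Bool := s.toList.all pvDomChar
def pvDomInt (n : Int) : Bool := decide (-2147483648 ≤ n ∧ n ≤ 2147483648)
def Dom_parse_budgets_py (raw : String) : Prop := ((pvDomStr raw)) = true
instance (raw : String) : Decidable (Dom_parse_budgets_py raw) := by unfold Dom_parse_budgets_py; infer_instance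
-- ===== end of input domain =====

-- B replaces A's forward seen-set pass by a reverse traversal that prepends each positive
-- value and filters its duplicates out of the accumulated result ("alternative").

-- ===== PORT A =====
-- A's loop body; the Option state is none exactly where int(text) raises ValueError.
def pvStepA (st : Option (List Int × PySem.Set Int)) (chunk : List Char) :
    Option (List Int × PySem.Set Int) :=
  match st with
  | none => none
  | some (budgets, seen) =>
    let text := PySem.Chars.strip chunk
    if text.isEmpty then some (budgets, seen)
    else
      match PySem.Int.ofChars? text with
      | none => none
      | some value =>
        if value ≤ 0 then some (budgets, seen)
        else if PySem.Set.contains seen value then some (budgets, seen)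
        else some (budgets ++ [value], PySem.Set.add seen value)

def parse_budgets_py (raw : String) : List Int :=
  let raw' := if raw = "" then "" else raw        -- str(raw or "")
  match (PySem.Chars.splitOn raw'.toList [',']).foldl pvStepA (some ([], PySem.Set.empty)) with
  | none => []                                    -- int(text) raised (outside Pre_)
  | some (budgets, _) => budgets                  -- empty budgets raises in Python (outside Pre_)

-- ===== PORT B =====
-- B's loop body: prepend the positive value and drop its duplicates from the accumulator.
def pvStepB (budgets : List Int) (chunk : List Char) : List Int :=
  let text := PySem.Chars.strip chunk
  if text.isEmpty then budgets
  else
    match PySem.Int.ofChars? text with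
    | none => budgets                             -- int(text) raised (outside Pre_)
    | some value =>
      if value ≤ 0 then budgets
      else value :: budgets.filter (fun v => decide (v ≠ value))

def parse_budgets_py_alt (raw : String) : List Int :=
  let raw' := if raw = "" then "" else raw        -- str(raw or "")
  ((PySem.Chars.splitOn raw'.toList [',']).reverse).foldl pvStepB []
                                                  -- empty budgets raises in Python (outside Pre_)

-- ===== PRECONDITION & SPEC =====
-- Pre_ excludes exactly the inputs where A raises ValueError: a nonempty stripped token that
-- int() rejects, or no positive integer among the tokens (B raises there as well).
def Pre_parse_budgets_py (raw : String) : Prop :=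
  (∀ t ∈ (PySem.Chars.splitOn raw.toList [',']).map PySem.Chars.strip,
      t ≠ [] → (PySem.Int.ofChars? t).isSome) ∧
  (∃ t ∈ (PySem.Chars.splitOn raw.toList [',']).map PySem.Chars.strip,
      ∃ v, PySem.Int.ofChars? t = some v ∧ 0 < v)
instance (raw : String) : Decidable (Pre_parse_budgets_py raw) := by
  unfold Pre_parse_budgets_py; infer_instance
def pvWitness_parse_budgets_py : String := "3, 1,3"

def Spec_parse_budgets_py (raw : String) (out : List Int) : Prop := out = parse_budgets_py_alt raw
instance (raw : String) (out : List Int) : Decidable (Spec_parse_budgets_py raw out) := by unfold Spec_parse_budgets_py; infer_instance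

-- ===== CLAIM (what is proved, stated in full; the proofs are below) =====
def Claim_equal_parse_budgets_py : Prop := ∀ (raw : String), Dom_parse_budgets_py raw → Pre_parse_budgets_py raw → Spec_parse_budgets_py raw (parse_budgets_py raw)

-- ===== LEMMAS AND PROOFS =====

-- The list of positive parsed values, in token order (proof-only canonical form).
def pvParsed (chunks : List (List Char)) : List Int :=
  (((chunks.map PySem.Chars.strip).filter (fun t => !t.isEmpty)).filterMap
    PySem.Int.ofChars?).filter (fun v => decide (0 < v))

-- First-occurrence dedup, recursively (proof-only canonical form).
def pvNubF : List Int → List Int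
  | [] => []
  | v :: P => v :: pvNubF (P.filter (fun x => decide (x ≠ v)))
termination_by l => l.length
decreasing_by
  simp only [List.length_unattach, List.length_cons, Nat.lt_succ_iff]
  exact le_trans (List.length_filter_le _ _) (le_of_eq List.length_attach)

@[simp] lemma pvNubF_nil : pvNubF [] = [] := pvNubF.eq_1

@[simp] lemma pvNubF_cons (v : Int) (P : List Int) :
    pvNubF (v :: P) = v :: pvNubF (P.filter (fun x => decide (x ≠ v))) := pvNubF.eq_2 v P

-- A's loop, started from a state whose budgets list and seen set coincide, computes
-- the running Set.add fold of the parsed list (so both components stay equal).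
lemma pvFoldA_eq (cs : List (List Char)) (s : PySem.Set Int)
    (h : ∀ t ∈ cs.map PySem.Chars.strip, t ≠ [] → (PySem.Int.ofChars? t).isSome) :
    cs.foldl pvStepA (some (s, s)) =
      some ((pvParsed cs).foldl PySem.Set.add s, (pvParsed cs).foldl PySem.Set.add s) := by
  induction cs generalizing s with
  | nil => simp [pvParsed]
  | cons c cs ih =>
    have hc := h (PySem.Chars.strip c) (by simp)
    have hrest : ∀ t ∈ cs.map PySem.Chars.strip, t ≠ [] → (PySem.Int.ofChars? t).isSome := by
      intro t ht; exact h t (by simp at ht ⊢; exact Or.inr ht)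
    by_cases he : (PySem.Chars.strip c).isEmpty
    · have : pvParsed (c :: cs) = pvParsed cs := by
        simp [pvParsed, he]
      rw [List.foldl_cons, this]
      have hstep : pvStepA (some (s, s)) c = some (s, s) := by
        simp [pvStepA, he]
      rw [hstep, ih s hrest]
    · have hne : (PySem.Chars.strip c) ≠ [] := by
        simpa [List.isEmpty_iff] using he
      obtain ⟨v, hv⟩ := Option.isSome_iff_exists.mp (hc hne)
      have hparsed : pvParsed (c :: cs) =
          (if 0 < v then [v] else []) ++ pvParsed cs := by
        simp [pvParsed, he, hv]
        split_ifs with hpos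
        · simp [hpos]
        · simp [hpos]
      by_cases hpos : 0 < v
      · have hstep : pvStepA (some (s, s)) c = some (PySem.Set.add s v, PySem.Set.add s v) := by
          simp [pvStepA, he, hv, PySem.Set.add, not_le.mpr hpos]
          by_cases hmem : v ∈ s <;> simp [hmem]
        rw [List.foldl_cons, hstep, ih _ hrest, hparsed]
        simp [hpos]
      · have hstep : pvStepA (some (s, s)) c = some (s, s) := by
          simp [pvStepA, hv, not_lt.mp hpos]
        rw [List.foldl_cons, hstep, ih s hrest, hparsed]
        simp [hpos]

-- A's Set.add fold equals first-occurrence dedup of the values not already seen.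
lemma pvFoldAdd_eq_nubF (P : List Int) (s : PySem.Set Int) :
    P.foldl PySem.Set.add s = s ++ pvNubF (P.filter (fun x => decide (x ∉ s))) := by
  induction P generalizing s with
  | nil => simp
  | cons v P ih =>
    by_cases hmem : v ∈ s
    · have : PySem.Set.add s v = s := by
        simp [PySem.Set.add, hmem]
      simp only [List.foldl_cons, this, List.filter_cons, hmem]
      simpa using ih s
    · have hadd : PySem.Set.add s v = s ++ [v] := by
        simp [PySem.Set.add, hmem]
      have hfl : P.filter (fun x => decide (x ∉ s ++ [v])) =
          (P.filter (fun x => decide (x ∉ s))).filter (fun x => decide (x ≠ v)) := by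
        rw [List.filter_filter]
        apply List.filter_congr
        intro x _
        by_cases h1 : x ∈ s <;> by_cases h2 : x = v <;> simp [h1, h2]
      simp only [List.foldl_cons, hadd, List.filter_cons, hmem]
      rw [ih (s ++ [v]), hfl]
      simp [List.filter_filter]

-- Filtering (≠ w) commutes with B's foldr dedup.
lemma pvFoldrB_filter (P : List Int) (w : Int) :
    (P.foldr (fun v acc => v :: acc.filter (fun x => decide (x ≠ v))) []).filter
        (fun x => decide (x ≠ w)) =
      (P.filter (fun x => decide (x ≠ w))).foldr
        (fun v acc => v :: acc.filter (fun x => decide (x ≠ v))) [] := by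
  induction P with
  | nil => simp
  | cons u P ih =>
    by_cases huw : u = w
    · subst huw
      simp only [List.foldr_cons, List.filter_cons]
      simp only [List.filter_filter]
      simp only [decide_not, Bool.and_self]
      simpa using ih
    · simp only [List.foldr_cons, List.filter_cons]
      rw [List.filter_comm, ih]
      simp [huw]

-- B's foldr dedup equals first-occurrence dedup.
lemma pvFoldrB_eq_nubF (P : List Int) :
    P.foldr (fun v acc => v :: acc.filter (fun x => decide (x ≠ v))) [] = pvNubF P := by
  induction hn : P.length using Nat.strong_induction_on generalizing P with
  | _ n ih =>
    cases P with
    | nil => simp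
    | cons v P =>
      rw [List.foldr_cons, pvFoldrB_filter, pvNubF_cons]
      have hlt : (P.filter (fun x => decide (x ≠ v))).length < n := by
        subst hn
        exact Nat.lt_succ_of_le (List.length_filter_le _ _)
      rw [ih _ hlt _ rfl]

-- B's fold over the reversed chunk list computes the foldr dedup of the parsed values.
lemma pvFoldB_eq (cs : List (List Char)) :
    cs.reverse.foldl pvStepB [] =
      (pvParsed cs).foldr (fun v acc => v :: acc.filter (fun x => decide (x ≠ v))) [] := by
  rw [List.foldl_reverse]
  induction cs with
  | nil => simp [pvParsed]
  | cons c cs ih =>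
    by_cases he : (PySem.Chars.strip c).isEmpty
    · have hp : pvParsed (c :: cs) = pvParsed cs := by simp [pvParsed, he]
      simp only [List.foldr_cons, hp, ← ih]
      simp [pvStepB, he]
    · cases hv : PySem.Int.ofChars? (PySem.Chars.strip c) with
      | none =>
        have hp : pvParsed (c :: cs) = pvParsed cs := by simp [pvParsed, he, hv]
        simp only [List.foldr_cons, hp, ← ih]
        simp [pvStepB, he, hv]
      | some v =>
        have hp : pvParsed (c :: cs) = (if 0 < v then [v] else []) ++ pvParsed cs := by
          simp [pvParsed, he, hv]
          split_ifs with hpos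
          · simp [hpos]
          · simp [hpos]
        by_cases hpos : 0 < v
        · simp only [List.foldr_cons, hp, hpos, if_true, List.cons_append, List.nil_append,
            List.foldr_cons, ← ih]
          simp [pvStepB, he, hv, not_le.mpr hpos]
        · simp only [List.foldr_cons, hp, hpos, if_false, List.nil_append, ← ih]
          simp [pvStepB, he, hv, not_lt.mp hpos]

-- ===== VERDICT (by name: the statement is the Claim_ definition above) =====
theorem parse_budgets_py_spec : Claim_equal_parse_budgets_py := by
  intro raw _ hpre
  unfold Spec_parse_budgets_py parse_budgets_py parse_budgets_py_alt
  have hraw : (if raw = "" then "" else raw) = raw := by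
    split_ifs with h
    · exact h.symm
    · rfl
  simp only [hraw]
  simp only [show (PySem.Set.empty : PySem.Set Int) = [] from rfl]
  rw [pvFoldA_eq _ ([] : PySem.Set Int) hpre.1, pvFoldB_eq, pvFoldrB_eq_nubF,
    pvFoldAdd_eq_nubF]
  simp
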